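-- pv_equiv track=rewrite | github.com/MatDawit/UMBC-CMSC201 | Homework/hw6/quasipal.py | quasi_palindrome
-- ===== SOURCE A (Python) =====
-- def quasi_palindrome(word, errors):
--     """
--     A function to find if a word is a palindrome based on amount of errors
--     :param word: word to test if a palindrome
--     :param errors: amount of errors to allow in palindrome
--     :return: True or False
--     """
--     word = "".join("".join(word.split("'")).split())
--
--     if len(word) <= 1:
--         return True
--
--     if word[0] != word[len(word)-1]:
--         errors -= 1
--
--         if errors < 0:
--             return False
--
--     return quasi_palindrome(word[1:-1], errors)
-- ===== SOURCE B (Python) =====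
-- def quasi_palindrome(word, errors):
--     cleaned = [c for c in word if c != "'" and not c.isspace()]
--     mismatches = 0
--     i, j = 0, len(cleaned) - 1
--     while i < j:
--         if cleaned[i] != cleaned[j]:
--             mismatches += 1
--         i += 1
--         j -= 1
--     return mismatches == 0 or mismatches <= errors
-- ===== Notes on version B (the rewrite author's own statement) =====
-- stated objective: faster
-- what changed: Replaces the recursion that re-cleans the string and re-slices word[1:-1] at every level with a single cleaning pass followed by a two-pointer scan counting mismatched end pairs, returning True iff there are no mismatches or at most `errors` of them.
import Mathlib
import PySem

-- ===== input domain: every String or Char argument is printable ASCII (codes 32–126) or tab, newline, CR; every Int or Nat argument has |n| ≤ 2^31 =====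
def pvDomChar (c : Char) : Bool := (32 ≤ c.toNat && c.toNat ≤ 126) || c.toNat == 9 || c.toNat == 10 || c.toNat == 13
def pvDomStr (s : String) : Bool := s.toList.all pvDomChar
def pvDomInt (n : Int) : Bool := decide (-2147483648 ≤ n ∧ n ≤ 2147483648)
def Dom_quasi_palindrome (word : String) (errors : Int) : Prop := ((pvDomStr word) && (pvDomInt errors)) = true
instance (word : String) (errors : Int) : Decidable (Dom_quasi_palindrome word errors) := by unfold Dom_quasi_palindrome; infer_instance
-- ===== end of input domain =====

-- B replaces A's recursion (which re-cleans the string and re-slices word[1:-1] at every level) by one cleaning pass plus a linear two-pointer mismatch count; measured faster.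


-- ===== PORT A =====
-- word = "".join("".join(word.split("'")).split())
def qpClean (cs : List Char) : List Char :=
  PySem.Chars.join [] (PySem.Chars.split₀ (PySem.Chars.join [] ((PySem.Chars.split? cs ['\'']).getD [])))

-- the next four lemmas characterise qpClean as a filter; qpA's termination proof cites qpClean_len_le
theorem intercalate_nil_flatten (parts : List (List Char)) :
    List.intercalate [] parts = parts.flatten := by
  induction parts with
  | nil => simp [List.intercalate]
  | cons p ps ih => cases ps <;> simp_all [List.intercalate, List.intersperse]

theorem splitOn_go_flatten (q : Char) : ∀ (fuel : Nat) (l cur : List Char) (acc : List (List Char)), l.length ≤ fuel →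
    (PySem.Chars.splitOn.go [q] fuel l cur acc).flatten
      = acc.reverse.flatten ++ cur.reverse ++ l.filter (fun c => !(c == q)) := by
  intro fuel
  induction fuel with
  | zero => intro l cur acc h
            have : l = [] := List.eq_nil_of_length_eq_zero (Nat.le_zero.mp h)
            subst this
            simp [PySem.Chars.splitOn.go]
  | succ n ih =>
      intro l cur acc h
      cases l with
      | nil => simp [PySem.Chars.splitOn.go]
      | cons c rest =>
          by_cases hc : c = q
          · subst hc
            have hpre : [c].isPrefixOf (c :: rest) = true := by simp [List.isPrefixOf]
            simp only [PySem.Chars.splitOn.go, hpre, if_true]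
            rw [ih _ _ _ (by simpa using Nat.le_of_succ_le_succ h)]
            simp
          · have hpre : [q].isPrefixOf (c :: rest) = false := by
              simp [List.isPrefixOf]; exact fun h => hc h.symm
            simp only [PySem.Chars.splitOn.go, hpre, Bool.false_eq_true, if_false]
            rw [ih _ _ _ (by simpa using Nat.le_of_succ_le_succ h)]
            simp [hc]

theorem split₀_go_flatten : ∀ (l cur : List Char) (acc : List (List Char)),
    (PySem.Chars.split₀.go l cur acc).flatten
      = acc.reverse.flatten ++ cur.reverse ++ l.filter (fun c => !(PySem.Chars.isspace c)) := by
  intro l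
  induction l with
  | nil => intro cur acc
           by_cases hc : cur = [] <;> simp [PySem.Chars.split₀.go, hc]
  | cons c rest ih =>
      intro cur acc
      by_cases hs : PySem.Chars.isspace c
      · by_cases hc : cur = []
        · subst hc; simp [PySem.Chars.split₀.go, hs, ih]
        · simp [PySem.Chars.split₀.go, hs, hc, ih]
      · simp [PySem.Chars.split₀.go, hs, ih]

theorem qpClean_filter_char (cs : List Char) :
    qpClean cs = cs.filter (fun c => !PySem.Chars.isspace c && !(c == '\'')) := by
  have h1 : PySem.Chars.join [] ((PySem.Chars.split? cs ['\'']).getD [])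
      = cs.filter (fun c => !(c == '\'')) := by
    simp only [PySem.Chars.split?, PySem.Chars.join, List.isEmpty_cons, Option.getD_some,
      Bool.false_eq_true, if_false, PySem.Chars.splitOn]
    rw [intercalate_nil_flatten, splitOn_go_flatten _ _ _ _ _ (by omega)]
    simp
  unfold qpClean
  rw [h1]
  simp only [PySem.Chars.join, PySem.Chars.split₀]
  rw [intercalate_nil_flatten, split₀_go_flatten]
  simp only [List.reverse_nil, List.flatten_nil, List.nil_append, List.filter_filter]

theorem qpClean_len_le (cs : List Char) : (qpClean cs).length ≤ cs.length := by
  rw [qpClean_filter_char]; exact List.length_filter_le _ _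

-- recursion of A on the character list (the Python recursion re-cleans at every level)
def qpA (cs : List Char) (errors : Int) : Bool :=
  let w := qpClean cs
  if w.length ≤ 1 then true
  else if PySem.List.pyGetD w 0 ' ' ≠ PySem.List.pyGetD w ((w.length : Int) - 1) ' ' then
    if errors - 1 < 0 then false
    else qpA (PySem.List.slice w (some 1) (some (-1))) (errors - 1)
  else qpA (PySem.List.slice w (some 1) (some (-1))) errors
termination_by cs.length
decreasing_by
  all_goals
    simp only [PySem.List.length_slice, PySem.List.clampIdx_neg_one] at *
    have hw : w.length = (qpClean cs).length := rfl
    have h1 : (qpClean cs).length ≤ cs.length := qpClean_len_le cs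
    have h2 : PySem.List.clampIdx (qpClean cs).length 1 = min 1 (qpClean cs).length := by
      exact_mod_cast PySem.List.clampIdx_natCast (qpClean cs).length 1
    rw [h2] at *
    omega

def quasi_palindrome (word : String) (errors : Int) : Bool :=
  qpA word.toList errors

-- ===== PORT B =====
-- [c for c in word if c != "'" and not c.isspace()]
def qpKeep (c : Char) : Bool := !(c == '\'') && !(PySem.Chars.isspace c)

-- the two-pointer while loop of B, counting mismatched end pairs
def qpLoop (cs : List Char) (i j : Int) (m : Nat) : Nat :=
  if i < j then
    qpLoop cs (i + 1) (j - 1)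
      (if PySem.List.pyGetD cs i ' ' ≠ PySem.List.pyGetD cs j ' ' then m + 1 else m)
  else m
termination_by (j - i).toNat
decreasing_by omega

def quasi_palindrome_alt (word : String) (errors : Int) : Bool :=
  let cleaned := word.toList.filter qpKeep
  let m := qpLoop cleaned 0 ((cleaned.length : Int) - 1) 0
  decide (m = 0) || decide ((m : Int) ≤ errors)

-- ===== PRECONDITION & SPEC =====
def Spec_quasi_palindrome (word : String) (errors : Int) (out : Bool) : Prop := out = quasi_palindrome_alt word errors
instance (word : String) (errors : Int) (out : Bool) : Decidable (Spec_quasi_palindrome word errors out) := by unfold Spec_quasi_palindrome; infer_instance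

-- ===== CLAIM (what is proved, stated in full; the proofs are below) =====
def Claim_equal_quasi_palindrome : Prop := ∀ (word : String) (errors : Int), Dom_quasi_palindrome word errors → Spec_quasi_palindrome word errors (quasi_palindrome word errors)

-- ===== LEMMAS AND PROOFS =====
theorem qpClean_eq_keep (cs : List Char) : qpClean cs = cs.filter qpKeep := by
  rw [qpClean_filter_char]
  congr 1
  funext c
  simp [qpKeep, Bool.and_comm]

-- B's mismatch count of a whole list
def qpMism (w : List Char) : Nat := qpLoop w 0 ((w.length : Int) - 1) 0

theorem qpLoop_acc : ∀ (n : Nat) (cs : List Char) (i j : Int) (m : Nat), (j - i).toNat = n →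
    qpLoop cs i j m = m + qpLoop cs i j 0 := by
  intro n
  induction n using Nat.strong_induction_on with
  | _ n ih =>
    intro cs i j m hn
    by_cases h : i < j
    · conv_lhs => rw [qpLoop]
      conv_rhs => rw [qpLoop]
      rw [if_pos h, if_pos h]
      by_cases hne : PySem.List.pyGetD cs i ' ' ≠ PySem.List.pyGetD cs j ' '
      · rw [if_pos hne, if_pos hne,
            ih ((j-1) - (i+1)).toNat (by omega) cs (i+1) (j-1) (m+1) rfl,
            ih ((j-1) - (i+1)).toNat (by omega) cs (i+1) (j-1) (0+1) rfl]
        omega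
      · rw [if_neg hne, if_neg hne,
            ih ((j-1) - (i+1)).toNat (by omega) cs (i+1) (j-1) m rfl]
    · conv_lhs => rw [qpLoop]
      conv_rhs => rw [qpLoop]
      rw [if_neg h, if_neg h]; omega

theorem qpLoop_shift (a b : Char) (xs : List Char) : ∀ (n : Nat) (i j : Int) (m : Nat),
    (j - i).toNat = n → 0 ≤ i → j < xs.length →
    qpLoop (a :: (xs ++ [b])) (i + 1) (j + 1) m = qpLoop xs i j m := by
  intro n
  induction n using Nat.strong_induction_on with
  | _ n ih =>
    intro i j m hn hi hj
    by_cases h : i < j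
    · conv_lhs => rw [qpLoop]
      conv_rhs => rw [qpLoop]
      rw [if_pos (by omega : i + 1 < j + 1), if_pos h]
      have hjpos : 0 ≤ j := by omega
      have hilen : i < xs.length := by omega
      have e1 : PySem.List.pyGetD (a :: (xs ++ [b])) (i + 1) ' ' = PySem.List.pyGetD xs i ' ' := by
        rw [PySem.List.pyGetD_eq_getElem _ ' ' (by omega) (by simp; omega),
            PySem.List.pyGetD_eq_getElem _ ' ' hi (by exact_mod_cast hilen)]
        have : (i + 1).toNat = i.toNat + 1 := by omega
        simp only [this, List.getElem_cons_succ]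
        exact List.getElem_append_left (by omega)
      have e2 : PySem.List.pyGetD (a :: (xs ++ [b])) (j + 1) ' ' = PySem.List.pyGetD xs j ' ' := by
        rw [PySem.List.pyGetD_eq_getElem _ ' ' (by omega) (by simp; omega),
            PySem.List.pyGetD_eq_getElem _ ' ' hjpos (by exact_mod_cast hj)]
        have : (j + 1).toNat = j.toNat + 1 := by omega
        simp only [this, List.getElem_cons_succ]
        exact List.getElem_append_left (by omega)
      rw [e1, e2]
      have : (j - 1) + 1 = (j + 1) - 1 := by ring
      rw [← this]
      exact ih ((j-1)-(i+1)).toNat (by omega) (i+1) (j-1) _ rfl (by omega) (by omega)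
    · conv_lhs => rw [qpLoop]
      conv_rhs => rw [qpLoop]
      rw [if_neg (by omega : ¬ (i + 1 < j + 1)), if_neg h]

theorem qpMism_le_one : ∀ (w : List Char), w.length ≤ 1 → qpMism w = 0 := by
  intro w hw
  rw [qpMism, qpLoop, if_neg (by omega : ¬ (0 : Int) < (w.length : Int) - 1)]

theorem pyGetD_last_concat2 (a b : Char) (xs : List Char) :
    PySem.List.pyGetD (a :: (xs ++ [b])) (((a :: (xs ++ [b])).length : Int) - 1) ' ' = b := by
  have hlen : (a :: (xs ++ [b])).length = xs.length + 2 := by simp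
  rw [PySem.List.pyGetD_eq_getElem _ ' ' (by rw [hlen]; push_cast; omega) (by rw [hlen]; push_cast; omega)]
  have hidx : (((a :: (xs ++ [b])).length : Int) - 1).toNat = xs.length + 1 := by
    rw [hlen]; omega
  simp only [hidx, List.getElem_cons_succ]
  exact List.getElem_concat_length rfl _

theorem qpMism_cons_concat (a b : Char) (xs : List Char) :
    qpMism (a :: (xs ++ [b])) = (if a = b then 0 else 1) + qpMism xs := by
  have hlen : (a :: (xs ++ [b])).length = xs.length + 2 := by simp
  rw [qpMism]
  conv_lhs => rw [qpLoop]
  rw [if_pos (by rw [hlen]; push_cast; omega)]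
  have e1 : PySem.List.pyGetD (a :: (xs ++ [b])) 0 ' ' = a := PySem.List.pyGetD_zero_cons ..
  have e2 := pyGetD_last_concat2 a b xs
  rw [e1, e2]
  have hshift : qpLoop (a :: (xs ++ [b])) (0 + 1) (((xs.length : Int) - 1) + 1) 0 = qpMism xs := by
    exact qpLoop_shift a b xs _ 0 ((xs.length : Int) - 1) 0 rfl (by omega) (by omega)
  have harg : ((a :: (xs ++ [b])).length : Int) - 1 - 1 = ((xs.length : Int) - 1) + 1 := by
    rw [hlen]; push_cast; ring
  rw [harg]
  by_cases hab : a = b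
  · rw [if_neg (by simp [hab] : ¬ a ≠ b), if_pos hab, hshift]
    omega
  · rw [if_pos hab, if_neg hab, qpLoop_acc _ _ _ _ _ rfl, hshift]

theorem slice_one_neg_one (w : List Char) (h : 2 ≤ w.length) :
    PySem.List.slice w (some 1) (some (-1)) = w.tail.dropLast := by
  simp only [PySem.List.slice, PySem.List.clampIdx]
  norm_num
  have hne : w ≠ [] := by intro he; rw [he] at h; simp at h
  rw [if_neg hne, List.dropLast_eq_take, List.length_tail]
  congr 1
  · omega
  · have : min 1 w.length = 1 := by omega
    rw [this, List.drop_one]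

theorem qpA_eq : ∀ (n : Nat) (cs : List Char) (e : Int), cs.length = n →
    qpA cs e = (decide (qpMism (qpClean cs) = 0) || decide ((qpMism (qpClean cs) : Int) ≤ e)) := by
  intro n
  induction n using Nat.strong_induction_on with
  | _ n ih =>
    intro cs e hn
    rw [qpA]
    set w := qpClean cs with hw
    by_cases h1 : w.length ≤ 1
    · rw [if_pos h1, qpMism_le_one w h1]; simp
    · rw [if_neg h1]
      have h2 : 2 ≤ w.length := by omega
      obtain ⟨a, t, hat⟩ : ∃ a t, w = a :: t :=
        List.exists_cons_of_ne_nil (by intro he; rw [he] at h2; simp at h2)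
      have ht : t ≠ [] := by
        intro h; rw [hat, h] at h2; simp at h2
      obtain ⟨xs, b, hxb⟩ : ∃ xs b, t = xs ++ [b] :=
        ⟨t.dropLast, t.getLast ht, (List.dropLast_append_getLast ht).symm⟩
      have hwab : w = a :: (xs ++ [b]) := by rw [hat, hxb]
      have hkeep : ∀ c ∈ w, qpKeep c := by
        rw [hw, qpClean_eq_keep]
        exact fun c hc => (List.mem_filter.mp hc).2
      have hcxs : qpClean xs = xs := by
        rw [qpClean_eq_keep]
        exact List.filter_eq_self.mpr (fun c hc => hkeep c (by rw [hwab]; simp [hc]))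
      have hslice : PySem.List.slice w (some 1) (some (-1)) = xs := by
        rw [slice_one_neg_one w h2, hwab]
        simp
      have hlt : xs.length < n := by
        have hle : w.length ≤ cs.length := qpClean_len_le cs
        have : w.length = xs.length + 2 := by rw [hwab]; simp
        omega
      have IH : ∀ e' : Int, qpA xs e' = (decide (qpMism xs = 0) || decide ((qpMism xs : Int) ≤ e')) := by
        intro e'
        rw [ih xs.length hlt xs e' rfl, hcxs]
      have e1 : PySem.List.pyGetD w 0 ' ' = a := by
        rw [hwab]; exact PySem.List.pyGetD_zero_cons ..
      have e2 : PySem.List.pyGetD w ((w.length : Int) - 1) ' ' = b := by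
        rw [hwab]; exact pyGetD_last_concat2 a b xs
      have hmism : qpMism w = (if a = b then 0 else 1) + qpMism xs := by
        rw [hwab]; exact qpMism_cons_concat a b xs
      rw [e1, e2, hslice]
      by_cases hab : a = b
      · rw [if_neg (by simp [hab] : ¬ a ≠ b), IH e, hmism, if_pos hab]
        simp
      · rw [if_pos hab, hmism, if_neg hab]
        by_cases he : e - 1 < 0
        · rw [if_pos he]
          symm
          rw [Bool.or_eq_false_iff]
          refine ⟨by simp, by simp; omega⟩
        · rw [if_neg he, IH (e - 1)]
          by_cases hm : qpMism xs = 0 <;> simp [hm] <;> omega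

-- ===== VERDICT (by name: the statement is the Claim_ definition above) =====
theorem quasi_palindrome_spec : Claim_equal_quasi_palindrome := by
  intro word errors _
  unfold Spec_quasi_palindrome quasi_palindrome quasi_palindrome_alt
  rw [qpA_eq word.toList.length word.toList errors rfl, qpClean_eq_keep]
  rfl
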